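-- pv_equiv track=rewrite | github.com/SaltieRL/Saltie | bot_code/conversions/binary_converter.py | as_non_overlapping_pairs
-- ===== SOURCE A (Python) =====
-- def as_non_overlapping_pairs(iterable):
--     """
--     [1,2,3,4,5,6] -> [(1,2), (3,4), (5,6)]
--     The given iterable must be of even length.
--     """
--     first = None  # the first item in the tuple
--     i = -1
--     for i, item in enumerate(iterable):
--         if i % 2 == 0:
--             first = item
--         else:
--             yield (first, item)
--     if i % 2 == 0:
--         raise Exception('Missing the second item of the pair. i=' + str(i))
-- ===== SOURCE B (Python) =====
-- def as_non_overlapping_pairs(iterable):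
--     """
--     [1,2,3,4,5,6] -> [(1,2), (3,4), (5,6)]
--     The given iterable must be of even length.
--     """
--     it = iter(iterable)
--     i = -1
--     for first in it:
--         i += 1
--         try:
--             second = next(it)
--         except StopIteration:
--             raise Exception('Missing the second item of the pair. i=' + str(i))
--         i += 1
--         yield (first, second)
-- ===== Notes on version B (the rewrite author's own statement) =====
-- stated objective: idiomatic
-- what changed: Replaces the index-parity loop (stash item on even index, yield on odd) with a pull-two-at-a-time iterator decomposition using next() and StopIteration handling.
import Mathlib
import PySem

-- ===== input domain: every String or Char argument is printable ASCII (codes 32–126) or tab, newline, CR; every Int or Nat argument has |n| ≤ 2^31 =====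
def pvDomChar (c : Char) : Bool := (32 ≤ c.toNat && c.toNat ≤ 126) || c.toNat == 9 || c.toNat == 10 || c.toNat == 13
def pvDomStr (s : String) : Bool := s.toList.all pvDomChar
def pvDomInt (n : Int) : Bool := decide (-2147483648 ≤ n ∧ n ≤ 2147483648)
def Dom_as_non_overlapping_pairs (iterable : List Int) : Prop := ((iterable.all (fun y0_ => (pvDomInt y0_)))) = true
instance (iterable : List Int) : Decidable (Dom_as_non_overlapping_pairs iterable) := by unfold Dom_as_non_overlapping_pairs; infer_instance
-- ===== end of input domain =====

-- B replaces A's index-parity loop with a pull-two-at-a-time recursion (idiomatic);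
-- both raise on odd-length input, which Pre_ excludes.

-- ===== PORT A =====
-- A's for-loop over enumerate(iterable): structural recursion carrying the same
-- state (first : Option Int, running index i, accumulated yields).
def as_non_overlapping_pairs_go (first : Option Int) (xs : List Int) (i : Int)
    (acc : List (Int × Int)) : List (Int × Int) :=
  match xs with
  | [] => acc
  | item :: rest =>
      let i' := i + 1
      if PySem.Int.mod i' 2 == 0 then
        as_non_overlapping_pairs_go (some item) rest i' acc
      else
        as_non_overlapping_pairs_go first rest i' (acc ++ [(first.getD 0, item)])

def as_non_overlapping_pairs (iterable : List Int) : List (Int × Int) :=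
  -- the final `if i % 2 == 0: raise` of A fires exactly on odd-length input,
  -- which Pre_ excludes; `first.getD 0` is never read on even indices first
  as_non_overlapping_pairs_go none iterable (-1) []

-- ===== PORT B =====
-- Source B pulls two items at a time from the iterator; the leftover-single case raises
-- (excluded by Pre_).
def as_non_overlapping_pairs_alt (iterable : List Int) : List (Int × Int) :=
  match iterable with
  | a :: b :: rest => (a, b) :: as_non_overlapping_pairs_alt rest
  | _ => []

-- ===== PRECONDITION & SPEC =====
-- A raises Exception on odd-length input (and B raises the same); Pre_ excludes those.
def Pre_as_non_overlapping_pairs (iterable : List Int) : Prop := iterable.length % 2 = 0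
instance (iterable : List Int) : Decidable (Pre_as_non_overlapping_pairs iterable) := by
  unfold Pre_as_non_overlapping_pairs; infer_instance
def pvWitness_as_non_overlapping_pairs : List Int := [1, 2, 3, 4, 5, 6]

def Spec_as_non_overlapping_pairs (iterable : List Int) (out : List (Int × Int)) : Prop := out = as_non_overlapping_pairs_alt iterable
instance (iterable : List Int) (out : List (Int × Int)) : Decidable (Spec_as_non_overlapping_pairs iterable out) := by unfold Spec_as_non_overlapping_pairs; infer_instance

-- ===== CLAIM (what is proved, stated in full; the proofs are below) =====
def Claim_equal_as_non_overlapping_pairs : Prop := ∀ (iterable : List Int), Dom_as_non_overlapping_pairs iterable → Pre_as_non_overlapping_pairs iterable → Spec_as_non_overlapping_pairs iterable (as_non_overlapping_pairs iterable)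

-- ===== LEMMAS AND PROOFS =====

theorem go_eq_alt : ∀ (xs : List Int), xs.length % 2 = 0 →
    ∀ (a : Option Int) (i : Int) (acc : List (Int × Int)), i % 2 = 1 →
    as_non_overlapping_pairs_go a xs i acc = acc ++ as_non_overlapping_pairs_alt xs
  | [], _, a, i, acc, _ => by simp [as_non_overlapping_pairs_go, as_non_overlapping_pairs_alt]
  | [x], h, _, _, _, _ => by simp at h
  | x :: y :: rest, h, a, i, acc, hi => by
      have hrest : rest.length % 2 = 0 := by
        simp only [List.length_cons] at h; omega
      have hm : ∀ a : Int, PySem.Int.mod a 2 = a % 2 :=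
        fun a => PySem.Int.mod_eq_emod_of_pos (by norm_num)
      have h1 : PySem.Int.mod (i + 1) 2 = 0 := by rw [hm]; omega
      have h2 : (i + 1 + 1) % 2 = 1 := by omega
      have h2' : ¬ (PySem.Int.mod (i + 1 + 1) 2 == 0) = true := by
        rw [hm] at *; simp; omega
      simp only [as_non_overlapping_pairs_go]
      rw [if_pos (by simp; omega), if_neg h2',
        go_eq_alt rest hrest (some x) (i + 1 + 1) _ h2]
      simp [as_non_overlapping_pairs_alt]

-- ===== VERDICT (by name: the statement is the Claim_ definition above) =====
theorem as_non_overlapping_pairs_spec : Claim_equal_as_non_overlapping_pairs := by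
  intro xs _ hpre
  unfold Spec_as_non_overlapping_pairs as_non_overlapping_pairs
  simpa using go_eq_alt xs hpre none (-1) [] (by decide)
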